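-- pv_equiv track=rewrite | github.com/falconsoft3d/trader_agent_flask | educational.py | get_slides
-- ===== SOURCE A (Python) =====
-- def get_slides(indicator_id, method_name, value, prediction, desc, history):
--     """
--     Generates 10 educational slides for a given indicator.
--     """
--
--     # Common slide structure helper
--     def slide(title, content, type="text"):
--         return {"title": title, "content": content, "type": type}
--
--     # Define content based on ID
--     slides = []
--
--     # 1. Title Slide (Common)
--     slides.append(slide(
--         f"Introducción a: {method_name}",
--         f"Bienvenido a esta guía paso a paso sobre el indicador {method_name}.<br>Aprenderemos qué es, cómo funciona y qué nos dice sobre el precio actual."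
--     ))
--
--     if indicator_id == "rsi":
--         slides.append(slide("¿Qué es el RSI?", "El Índice de Fuerza Relativa (RSI) es como el velocímetro de un coche. Nos dice qué tan rápido se está moviendo el precio y si el 'motor' (el mercado) se está calentando demasiado."))
--         slides.append(slide("La Metáfora", "Imagina una banda elástica. Si la estiras demasiado (precio sube mucho), eventualmente tiene que rebotar hacia atrás. El RSI mide cuánto se ha estirado esa banda."))
--         slides.append(slide("La Escala", "El RSI se mueve en una escala del 0 al 100. <br>• 0: Nadie quiere comprar.<br>• 100: Todos quieren comprar."))
--         slides.append(slide("Zona de Sobrecompra", "Cuando el RSI supera el 70, decimos que está 'Sobrecomprado'. Es como si la banda elástica estuviera al límite. Es probable que el precio baje pronto."))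
--         slides.append(slide("Zona de Sobreventa", "Cuando el RSI cae por debajo de 30, está 'Sobrevendido'. La banda está floja. Es probable que el precio suba pronto porque está demasiado barato."))
--         slides.append(slide("El Cálculo", "Compara los días que el precio subió con los días que bajó. Si hubo muchos días de subida fuerte, el RSI será alto."))
--         slides.append(slide("Análisis Actual", f"Valor actual: <strong>{value}</strong>.<br>Dado este valor, el indicador sugiere: <strong>{prediction}</strong>."))
--         slides.append(slide("Señales Falsas", "¡Cuidado! En tendencias muy fuertes, el RSI puede quedarse en 'Sobrecompra' durante mucho tiempo mientras el precio sigue subiendo."))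
--         slides.append(slide("Origen Histórico", history))
--
--     elif indicator_id == "macd":
--         slides.append(slide("¿Qué es el MACD?", "MACD significa Convergencia/Divergencia de Medias Móviles. Es un rastreador de tendencias y de impulso."))
--         slides.append(slide("La Metáfora", "Piensa en un corredor (el precio) y su sombra. A veces corren juntos, a veces se separan. El MACD mide esa separación para predecir giros."))
--         slides.append(slide("Los Componentes", "Tiene dos líneas principales: <br>1. La línea MACD (rápida).<br>2. La línea de Señal (lenta)."))
--         slides.append(slide("El Cruce Alcista", "Cuando la línea rápida cruza por ENCIMA de la lenta, es como si el corredor acelerara. Es una señal de COMPRA."))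
--         slides.append(slide("El Cruce Bajista", "Cuando la línea rápida cruza por DEBAJO de la lenta, el corredor se cansa. Es una señal de VENTA."))
--         slides.append(slide("El Histograma", "A menudo verás barras verticales. Representan la distancia entre las dos líneas. Si las barras crecen, la tendencia se fortalece."))
--         slides.append(slide("Análisis Actual", f"Lectura actual: <strong>{value}</strong>.<br>Según el cruce de líneas, la señal es: <strong>{prediction}</strong>."))
--         slides.append(slide("Divergencias", "Si el precio sube pero el MACD baja, es una advertencia grave de que la subida es falsa."))
--         slides.append(slide("Origen Histórico", history))
--
--     elif indicator_id == "bb":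
--         slides.append(slide("¿Qué son las Bandas de Bollinger?", "Son 'sobres' alrededor del precio que se expanden y contraen. Nos dicen si el mercado está tranquilo o loco (volátil)."))
--         slides.append(slide("La Metáfora", "Imagina una carretera. El precio suele mantenerse en el carril (dentro de las bandas). Si se sale del carril, es un evento excepcional."))
--         slides.append(slide("Componentes", "1. Banda Central: El precio promedio.<br>2. Bandas Externas: Límites estadísticos normales."))
--         slides.append(slide("Compresión (Squeeze)", "Cuando las bandas se estrechan, el mercado está 'tomando aire'. Generalmente, esto precede a un movimiento explosivo."))
--         slides.append(slide("Rebote", "El precio tiende a rebotar en las bandas exteriores y volver al centro, como una pelota en un pasillo."))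
--         slides.append(slide("Rupturas", "Si el precio rompe una banda con fuerza, puede indicar el inicio de una nueva tendencia, no solo un rebote."))
--         slides.append(slide("Análisis Actual", f"Datos actuales: <strong>{value}</strong>.<br>Basado en la posición respecto a las bandas: <strong>{prediction}</strong>."))
--         slides.append(slide("Limitaciones", "No predicen la dirección por sí solas, solo la volatilidad y los extremos relativos."))
--         slides.append(slide("Origen Histórico", history))
--
--     elif indicator_id == "sma":
--         slides.append(slide("¿Qué son las Medias Móviles?", "Son el promedio del precio en el pasado. Suavizan el ruido para ver la tendencia real."))
--         slides.append(slide("La Metáfora", "El precio diario es como las olas del mar (caótico). La SMA es como la marea (la dirección real del agua)."))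
--         slides.append(slide("SMA 50 vs 200", "• SMA 50: Tendencia a medio plazo (trimestral).<br>• SMA 200: Tendencia a largo plazo (anual)."))
--         slides.append(slide("Cruce Dorado", "Cuando la línea corta (50) cruza hacia ARRIBA a la larga (200). Es una de las señales alcistas más famosas."))
--         slides.append(slide("Cruce de la Muerte", "Cuando la línea corta (50) cruza hacia ABAJO a la larga (200). Señal de peligro a largo plazo."))
--         slides.append(slide("Soporte y Resistencia", "Muchas veces, el precio rebota exactamente en la línea de 200 días. Los inversores institucionales vigilan esto."))
--         slides.append(slide("Análisis Actual", f"Valores: <strong>{value}</strong>.<br>Relación entre medias: <strong>{prediction}</strong>."))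
--         slides.append(slide("Retraso (Lag)", "Al basarse en el pasado, las SMA reaccionan lento. No sirven para predecir picos rápidos."))
--         slides.append(slide("Origen Histórico", history))
--
--     else:
--         # Generic Template based specific textual details passed or generic logic
--         slides.append(slide("Concepto Básico", f"El indicador {method_name} es una herramienta matemática utilizada para predecir movimientos futuros basándose en patrones pasados."))
--         slides.append(slide("¿Qué mide?", desc))
--         slides.append(slide("La Lógica", "Los mercados no son totalmente aleatorios. Tienen memoria ypsicología. Este indicador intenta cuantificar esa psicología en un número."))
--         slides.append(slide("Interpretación", "Generalmente buscamos extremos. Si el valor es muy alto o muy bajo, sugiere que el mercado ha ido demasiado lejos y debe corregir."))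
--         slides.append(slide("Tendencia vs Oscilación", "Algunos indicadores siguen la tendencia (trend-following) y otros oscilan en rangos. Este indicador particular nos da pistas sobre: " + desc))
--         slides.append(slide("Lectura del Valor", f"El valor calculado hoy es: <strong>{value}</strong>."))
--         slides.append(slide("La Señal Generada", f"Basado en las reglas estándar, la señal es: <strong>{prediction}</strong>."))
--         slides.append(slide("¿Es infalible?", "Ningún indicador acierta el 100% de las veces. Siempre debe usarse en combinación con otros para confirmar."))
--         slides.append(slide("Origen Histórico", history))
--
--     # 10. Conclusion (Common)
--     slides.append(slide(
--         "Resumen Final",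
--         f"Hemos visto que el {method_name} está indicando actualmente <strong>{prediction}</strong>. Recuerda combinar esto con el análisis fundamental y tu propia gestión de riesgo."
--     ))
--
--     # Fill to ensure 10 slides if short
--     while len(slides) < 10:
--         slides.insert(len(slides)-1, slide("Dato Curioso", "El análisis técnico es una profecía autocumplida: funciona porque mucha gente cree que funciona y actúa en consecuencia."))
--
--     return slides[:10] # Ensure exactly 10 or max 10
-- ===== SOURCE B (Python) =====
-- def get_slides(indicator_id, method_name, value, prediction, desc, history):
--     """
--     Generates 10 educational slides for a given indicator.
--     Re-implementation: per-indicator middle slides come from a dispatch table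
--     of (title, content) pairs; the result is title + 8 middles + conclusion,
--     so no padding loop is needed (every branch yields exactly 8 middles).
--     """
--     def slide(title, content, type="text"):
--         return {"title": title, "content": content, "type": type}
--
--     table = {
--         "rsi": [
--             ("¿Qué es el RSI?", "El Índice de Fuerza Relativa (RSI) es como el velocímetro de un coche. Nos dice qué tan rápido se está moviendo el precio y si el 'motor' (el mercado) se está calentando demasiado."),
--             ("La Metáfora", "Imagina una banda elástica. Si la estiras demasiado (precio sube mucho), eventualmente tiene que rebotar hacia atrás. El RSI mide cuánto se ha estirado esa banda."),
--             ("La Escala", "El RSI se mueve en una escala del 0 al 100. <br>• 0: Nadie quiere comprar.<br>• 100: Todos quieren comprar."),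
--             ("Zona de Sobrecompra", "Cuando el RSI supera el 70, decimos que está 'Sobrecomprado'. Es como si la banda elástica estuviera al límite. Es probable que el precio baje pronto."),
--             ("Zona de Sobreventa", "Cuando el RSI cae por debajo de 30, está 'Sobrevendido'. La banda está floja. Es probable que el precio suba pronto porque está demasiado barato."),
--             ("El Cálculo", "Compara los días que el precio subió con los días que bajó. Si hubo muchos días de subida fuerte, el RSI será alto."),
--             ("Análisis Actual", f"Valor actual: <strong>{value}</strong>.<br>Dado este valor, el indicador sugiere: <strong>{prediction}</strong>."),
--             ("Señales Falsas", "¡Cuidado! En tendencias muy fuertes, el RSI puede quedarse en 'Sobrecompra' durante mucho tiempo mientras el precio sigue subiendo."),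
--         ],
--         "macd": [
--             ("¿Qué es el MACD?", "MACD significa Convergencia/Divergencia de Medias Móviles. Es un rastreador de tendencias y de impulso."),
--             ("La Metáfora", "Piensa en un corredor (el precio) y su sombra. A veces corren juntos, a veces se separan. El MACD mide esa separación para predecir giros."),
--             ("Los Componentes", "Tiene dos líneas principales: <br>1. La línea MACD (rápida).<br>2. La línea de Señal (lenta)."),
--             ("El Cruce Alcista", "Cuando la línea rápida cruza por ENCIMA de la lenta, es como si el corredor acelerara. Es una señal de COMPRA."),
--             ("El Cruce Bajista", "Cuando la línea rápida cruza por DEBAJO de la lenta, el corredor se cansa. Es una señal de VENTA."),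
--             ("El Histograma", "A menudo verás barras verticales. Representan la distancia entre las dos líneas. Si las barras crecen, la tendencia se fortalece."),
--             ("Análisis Actual", f"Lectura actual: <strong>{value}</strong>.<br>Según el cruce de líneas, la señal es: <strong>{prediction}</strong>."),
--             ("Divergencias", "Si el precio sube pero el MACD baja, es una advertencia grave de que la subida es falsa."),
--         ],
--         "bb": [
--             ("¿Qué son las Bandas de Bollinger?", "Son 'sobres' alrededor del precio que se expanden y contraen. Nos dicen si el mercado está tranquilo o loco (volátil)."),
--             ("La Metáfora", "Imagina una carretera. El precio suele mantenerse en el carril (dentro de las bandas). Si se sale del carril, es un evento excepcional."),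
--             ("Componentes", "1. Banda Central: El precio promedio.<br>2. Bandas Externas: Límites estadísticos normales."),
--             ("Compresión (Squeeze)", "Cuando las bandas se estrechan, el mercado está 'tomando aire'. Generalmente, esto precede a un movimiento explosivo."),
--             ("Rebote", "El precio tiende a rebotar en las bandas exteriores y volver al centro, como una pelota en un pasillo."),
--             ("Rupturas", "Si el precio rompe una banda con fuerza, puede indicar el inicio de una nueva tendencia, no solo un rebote."),
--             ("Análisis Actual", f"Datos actuales: <strong>{value}</strong>.<br>Basado en la posición respecto a las bandas: <strong>{prediction}</strong>."),
--             ("Limitaciones", "No predicen la dirección por sí solas, solo la volatilidad y los extremos relativos."),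
--         ],
--         "sma": [
--             ("¿Qué son las Medias Móviles?", "Son el promedio del precio en el pasado. Suavizan el ruido para ver la tendencia real."),
--             ("La Metáfora", "El precio diario es como las olas del mar (caótico). La SMA es como la marea (la dirección real del agua)."),
--             ("SMA 50 vs 200", "• SMA 50: Tendencia a medio plazo (trimestral).<br>• SMA 200: Tendencia a largo plazo (anual)."),
--             ("Cruce Dorado", "Cuando la línea corta (50) cruza hacia ARRIBA a la larga (200). Es una de las señales alcistas más famosas."),
--             ("Cruce de la Muerte", "Cuando la línea corta (50) cruza hacia ABAJO a la larga (200). Señal de peligro a largo plazo."),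
--             ("Soporte y Resistencia", "Muchas veces, el precio rebota exactamente en la línea de 200 días. Los inversores institucionales vigilan esto."),
--             ("Análisis Actual", f"Valores: <strong>{value}</strong>.<br>Relación entre medias: <strong>{prediction}</strong>."),
--             ("Retraso (Lag)", "Al basarse en el pasado, las SMA reaccionan lento. No sirven para predecir picos rápidos."),
--         ],
--     }
--     default_middles = [
--         ("Concepto Básico", f"El indicador {method_name} es una herramienta matemática utilizada para predecir movimientos futuros basándose en patrones pasados."),
--         ("¿Qué mide?", desc),
--         ("La Lógica", "Los mercados no son totalmente aleatorios. Tienen memoria ypsicología. Este indicador intenta cuantificar esa psicología en un número."),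
--         ("Interpretación", "Generalmente buscamos extremos. Si el valor es muy alto o muy bajo, sugiere que el mercado ha ido demasiado lejos y debe corregir."),
--         ("Tendencia vs Oscilación", "Algunos indicadores siguen la tendencia (trend-following) y otros oscilan en rangos. Este indicador particular nos da pistas sobre: " + desc),
--         ("Lectura del Valor", f"El valor calculado hoy es: <strong>{value}</strong>."),
--         ("La Señal Generada", f"Basado en las reglas estándar, la señal es: <strong>{prediction}</strong>."),
--         ("¿Es infalible?", "Ningún indicador acierta el 100% de las veces. Siempre debe usarse en combinación con otros para confirmar."),
--     ]
--     middles = table.get(indicator_id, default_middles)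
--     title_slide = slide(
--         f"Introducción a: {method_name}",
--         f"Bienvenido a esta guía paso a paso sobre el indicador {method_name}.<br>Aprenderemos qué es, cómo funciona y qué nos dice sobre el precio actual."
--     )
--     history_slide = slide("Origen Histórico", history)
--     # A "Resumen Final" slide would be number 11; get_slides returns only the
--     # first 10 slides, so it never appears in the output.
--     return [title_slide] + [slide(t, c) for t, c in middles] + [history_slide]
-- ===== Notes on version B (the rewrite author's own statement) =====
-- stated objective: simpler
-- what changed: Replaces the four-way if/elif of per-branch append sequences plus a padding while-loop and a [:10] truncation by a dispatch table of (title, content) pairs with a default list, mapping a single slide constructor over it between the common title and history slides; since the slide count is fixed, the padding and truncation logic disappears (A's 'Resumen Final' slide is slide 11 and is always cut by [:10], so B simply never builds it).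
import Mathlib
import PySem

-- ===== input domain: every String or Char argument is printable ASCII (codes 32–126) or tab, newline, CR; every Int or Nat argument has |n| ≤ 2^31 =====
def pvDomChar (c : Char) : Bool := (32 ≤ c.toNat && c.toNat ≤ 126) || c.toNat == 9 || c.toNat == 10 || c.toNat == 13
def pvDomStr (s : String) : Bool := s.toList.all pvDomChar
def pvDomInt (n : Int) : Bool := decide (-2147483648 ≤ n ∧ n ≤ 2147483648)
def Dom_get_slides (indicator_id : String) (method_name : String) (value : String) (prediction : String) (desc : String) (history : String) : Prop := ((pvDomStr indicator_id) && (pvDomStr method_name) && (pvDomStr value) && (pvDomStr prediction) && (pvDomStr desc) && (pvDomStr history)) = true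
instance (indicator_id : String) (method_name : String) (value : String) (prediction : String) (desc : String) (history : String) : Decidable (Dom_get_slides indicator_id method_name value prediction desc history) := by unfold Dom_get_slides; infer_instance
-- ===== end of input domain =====

-- B replaces A's four-way if/elif of append sequences and dead padding loop by a dispatch table of
-- (title, content) pairs plus the three common slides; same output, simpler (the truncation/padding logic disappears).


-- ===== PORT A =====
def pvSlideA (title content : String) : List (String × String) :=
  [("title", title), ("content", content), ("type", "text")]

-- the "Dato Curioso" padding slide of A's while-loop (the loop body; the list always has 11 slides, so the loop is in fact never entered)
def pvDatoCurioso : List (String × String) :=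
  pvSlideA "Dato Curioso" "El análisis técnico es una profecía autocumplida: funciona porque mucha gente cree que funciona y actúa en consecuencia."

-- A's `while len(slides) < 10: slides.insert(len(slides)-1, …)` loop, transliterated
def pvPad (xs : List (List (String × String))) : List (List (String × String)) :=
  if h : xs.length < 10 then
    pvPad (PySem.List.insert xs ((xs.length : Int) - 1) pvDatoCurioso)
  else xs
termination_by 10 - xs.length
decreasing_by simp [PySem.List.length_insert]; omega

def get_slides (indicator_id : String) (method_name : String) (value : String) (prediction : String) (desc : String) (history : String) : List (List (String × String)) :=
  let slides : List (List (String × String)) := []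
  let slides := slides ++ [pvSlideA ("Introducción a: " ++ method_name) ("Bienvenido a esta guía paso a paso sobre el indicador " ++ method_name ++ ".<br>Aprenderemos qué es, cómo funciona y qué nos dice sobre el precio actual.")]
  let slides :=
    if indicator_id == "rsi" then
      slides ++ [pvSlideA "¿Qué es el RSI?" "El Índice de Fuerza Relativa (RSI) es como el velocímetro de un coche. Nos dice qué tan rápido se está moviendo el precio y si el 'motor' (el mercado) se está calentando demasiado.",
        pvSlideA "La Metáfora" "Imagina una banda elástica. Si la estiras demasiado (precio sube mucho), eventualmente tiene que rebotar hacia atrás. El RSI mide cuánto se ha estirado esa banda.",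
        pvSlideA "La Escala" "El RSI se mueve en una escala del 0 al 100. <br>• 0: Nadie quiere comprar.<br>• 100: Todos quieren comprar.",
        pvSlideA "Zona de Sobrecompra" "Cuando el RSI supera el 70, decimos que está 'Sobrecomprado'. Es como si la banda elástica estuviera al límite. Es probable que el precio baje pronto.",
        pvSlideA "Zona de Sobreventa" "Cuando el RSI cae por debajo de 30, está 'Sobrevendido'. La banda está floja. Es probable que el precio suba pronto porque está demasiado barato.",
        pvSlideA "El Cálculo" "Compara los días que el precio subió con los días que bajó. Si hubo muchos días de subida fuerte, el RSI será alto.",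
        pvSlideA "Análisis Actual" ("Valor actual: <strong>" ++ value ++ "</strong>.<br>Dado este valor, el indicador sugiere: <strong>" ++ prediction ++ "</strong>."),
        pvSlideA "Señales Falsas" "¡Cuidado! En tendencias muy fuertes, el RSI puede quedarse en 'Sobrecompra' durante mucho tiempo mientras el precio sigue subiendo.",
        pvSlideA "Origen Histórico" history]
    else if indicator_id == "macd" then
      slides ++ [pvSlideA "¿Qué es el MACD?" "MACD significa Convergencia/Divergencia de Medias Móviles. Es un rastreador de tendencias y de impulso.",
        pvSlideA "La Metáfora" "Piensa en un corredor (el precio) y su sombra. A veces corren juntos, a veces se separan. El MACD mide esa separación para predecir giros.",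
        pvSlideA "Los Componentes" "Tiene dos líneas principales: <br>1. La línea MACD (rápida).<br>2. La línea de Señal (lenta).",
        pvSlideA "El Cruce Alcista" "Cuando la línea rápida cruza por ENCIMA de la lenta, es como si el corredor acelerara. Es una señal de COMPRA.",
        pvSlideA "El Cruce Bajista" "Cuando la línea rápida cruza por DEBAJO de la lenta, el corredor se cansa. Es una señal de VENTA.",
        pvSlideA "El Histograma" "A menudo verás barras verticales. Representan la distancia entre las dos líneas. Si las barras crecen, la tendencia se fortalece.",
        pvSlideA "Análisis Actual" ("Lectura actual: <strong>" ++ value ++ "</strong>.<br>Según el cruce de líneas, la señal es: <strong>" ++ prediction ++ "</strong>."),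
        pvSlideA "Divergencias" "Si el precio sube pero el MACD baja, es una advertencia grave de que la subida es falsa.",
        pvSlideA "Origen Histórico" history]
    else if indicator_id == "bb" then
      slides ++ [pvSlideA "¿Qué son las Bandas de Bollinger?" "Son 'sobres' alrededor del precio que se expanden y contraen. Nos dicen si el mercado está tranquilo o loco (volátil).",
        pvSlideA "La Metáfora" "Imagina una carretera. El precio suele mantenerse en el carril (dentro de las bandas). Si se sale del carril, es un evento excepcional.",
        pvSlideA "Componentes" "1. Banda Central: El precio promedio.<br>2. Bandas Externas: Límites estadísticos normales.",
        pvSlideA "Compresión (Squeeze)" "Cuando las bandas se estrechan, el mercado está 'tomando aire'. Generalmente, esto precede a un movimiento explosivo.",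
        pvSlideA "Rebote" "El precio tiende a rebotar en las bandas exteriores y volver al centro, como una pelota en un pasillo.",
        pvSlideA "Rupturas" "Si el precio rompe una banda con fuerza, puede indicar el inicio de una nueva tendencia, no solo un rebote.",
        pvSlideA "Análisis Actual" ("Datos actuales: <strong>" ++ value ++ "</strong>.<br>Basado en la posición respecto a las bandas: <strong>" ++ prediction ++ "</strong>."),
        pvSlideA "Limitaciones" "No predicen la dirección por sí solas, solo la volatilidad y los extremos relativos.",
        pvSlideA "Origen Histórico" history]
    else if indicator_id == "sma" then
      slides ++ [pvSlideA "¿Qué son las Medias Móviles?" "Son el promedio del precio en el pasado. Suavizan el ruido para ver la tendencia real.",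
        pvSlideA "La Metáfora" "El precio diario es como las olas del mar (caótico). La SMA es como la marea (la dirección real del agua).",
        pvSlideA "SMA 50 vs 200" "• SMA 50: Tendencia a medio plazo (trimestral).<br>• SMA 200: Tendencia a largo plazo (anual).",
        pvSlideA "Cruce Dorado" "Cuando la línea corta (50) cruza hacia ARRIBA a la larga (200). Es una de las señales alcistas más famosas.",
        pvSlideA "Cruce de la Muerte" "Cuando la línea corta (50) cruza hacia ABAJO a la larga (200). Señal de peligro a largo plazo.",
        pvSlideA "Soporte y Resistencia" "Muchas veces, el precio rebota exactamente en la línea de 200 días. Los inversores institucionales vigilan esto.",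
        pvSlideA "Análisis Actual" ("Valores: <strong>" ++ value ++ "</strong>.<br>Relación entre medias: <strong>" ++ prediction ++ "</strong>."),
        pvSlideA "Retraso (Lag)" "Al basarse en el pasado, las SMA reaccionan lento. No sirven para predecir picos rápidos.",
        pvSlideA "Origen Histórico" history]
    else
      slides ++ [pvSlideA "Concepto Básico" ("El indicador " ++ method_name ++ " es una herramienta matemática utilizada para predecir movimientos futuros basándose en patrones pasados."),
        pvSlideA "¿Qué mide?" (desc),
        pvSlideA "La Lógica" "Los mercados no son totalmente aleatorios. Tienen memoria ypsicología. Este indicador intenta cuantificar esa psicología en un número.",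
        pvSlideA "Interpretación" "Generalmente buscamos extremos. Si el valor es muy alto o muy bajo, sugiere que el mercado ha ido demasiado lejos y debe corregir.",
        pvSlideA "Tendencia vs Oscilación" ("Algunos indicadores siguen la tendencia (trend-following) y otros oscilan en rangos. Este indicador particular nos da pistas sobre: " ++ desc),
        pvSlideA "Lectura del Valor" ("El valor calculado hoy es: <strong>" ++ value ++ "</strong>."),
        pvSlideA "La Señal Generada" ("Basado en las reglas estándar, la señal es: <strong>" ++ prediction ++ "</strong>."),
        pvSlideA "¿Es infalible?" "Ningún indicador acierta el 100% de las veces. Siempre debe usarse en combinación con otros para confirmar.",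
        pvSlideA "Origen Histórico" history]
  let slides := slides ++ [pvSlideA "Resumen Final" ("Hemos visto que el " ++ method_name ++ " está indicando actualmente <strong>" ++ prediction ++ "</strong>. Recuerda combinar esto con el análisis fundamental y tu propia gestión de riesgo.")]
  PySem.List.slice (pvPad slides) none (some 10)

-- ===== PORT B =====
def pvSlideB (t c : String) : List (String × String) :=
  [("title", t), ("content", c), ("type", "text")]

def get_slides_alt (indicator_id : String) (method_name : String) (value : String) (prediction : String) (desc : String) (history : String) : List (List (String × String)) :=
  let table : PySem.Dict String (List (String × String)) := PySem.Dict.ofList [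
    ("rsi", [("¿Qué es el RSI?", "El Índice de Fuerza Relativa (RSI) es como el velocímetro de un coche. Nos dice qué tan rápido se está moviendo el precio y si el 'motor' (el mercado) se está calentando demasiado."),
        ("La Metáfora", "Imagina una banda elástica. Si la estiras demasiado (precio sube mucho), eventualmente tiene que rebotar hacia atrás. El RSI mide cuánto se ha estirado esa banda."),
        ("La Escala", "El RSI se mueve en una escala del 0 al 100. <br>• 0: Nadie quiere comprar.<br>• 100: Todos quieren comprar."),
        ("Zona de Sobrecompra", "Cuando el RSI supera el 70, decimos que está 'Sobrecomprado'. Es como si la banda elástica estuviera al límite. Es probable que el precio baje pronto."),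
        ("Zona de Sobreventa", "Cuando el RSI cae por debajo de 30, está 'Sobrevendido'. La banda está floja. Es probable que el precio suba pronto porque está demasiado barato."),
        ("El Cálculo", "Compara los días que el precio subió con los días que bajó. Si hubo muchos días de subida fuerte, el RSI será alto."),
        ("Análisis Actual", ("Valor actual: <strong>" ++ value ++ "</strong>.<br>Dado este valor, el indicador sugiere: <strong>" ++ prediction ++ "</strong>.")),
        ("Señales Falsas", "¡Cuidado! En tendencias muy fuertes, el RSI puede quedarse en 'Sobrecompra' durante mucho tiempo mientras el precio sigue subiendo.")]),
    ("macd", [("¿Qué es el MACD?", "MACD significa Convergencia/Divergencia de Medias Móviles. Es un rastreador de tendencias y de impulso."),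
        ("La Metáfora", "Piensa en un corredor (el precio) y su sombra. A veces corren juntos, a veces se separan. El MACD mide esa separación para predecir giros."),
        ("Los Componentes", "Tiene dos líneas principales: <br>1. La línea MACD (rápida).<br>2. La línea de Señal (lenta)."),
        ("El Cruce Alcista", "Cuando la línea rápida cruza por ENCIMA de la lenta, es como si el corredor acelerara. Es una señal de COMPRA."),
        ("El Cruce Bajista", "Cuando la línea rápida cruza por DEBAJO de la lenta, el corredor se cansa. Es una señal de VENTA."),
        ("El Histograma", "A menudo verás barras verticales. Representan la distancia entre las dos líneas. Si las barras crecen, la tendencia se fortalece."),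
        ("Análisis Actual", ("Lectura actual: <strong>" ++ value ++ "</strong>.<br>Según el cruce de líneas, la señal es: <strong>" ++ prediction ++ "</strong>.")),
        ("Divergencias", "Si el precio sube pero el MACD baja, es una advertencia grave de que la subida es falsa.")]),
    ("bb", [("¿Qué son las Bandas de Bollinger?", "Son 'sobres' alrededor del precio que se expanden y contraen. Nos dicen si el mercado está tranquilo o loco (volátil)."),
        ("La Metáfora", "Imagina una carretera. El precio suele mantenerse en el carril (dentro de las bandas). Si se sale del carril, es un evento excepcional."),
        ("Componentes", "1. Banda Central: El precio promedio.<br>2. Bandas Externas: Límites estadísticos normales."),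
        ("Compresión (Squeeze)", "Cuando las bandas se estrechan, el mercado está 'tomando aire'. Generalmente, esto precede a un movimiento explosivo."),
        ("Rebote", "El precio tiende a rebotar en las bandas exteriores y volver al centro, como una pelota en un pasillo."),
        ("Rupturas", "Si el precio rompe una banda con fuerza, puede indicar el inicio de una nueva tendencia, no solo un rebote."),
        ("Análisis Actual", ("Datos actuales: <strong>" ++ value ++ "</strong>.<br>Basado en la posición respecto a las bandas: <strong>" ++ prediction ++ "</strong>.")),
        ("Limitaciones", "No predicen la dirección por sí solas, solo la volatilidad y los extremos relativos.")]),
    ("sma", [("¿Qué son las Medias Móviles?", "Son el promedio del precio en el pasado. Suavizan el ruido para ver la tendencia real."),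
        ("La Metáfora", "El precio diario es como las olas del mar (caótico). La SMA es como la marea (la dirección real del agua)."),
        ("SMA 50 vs 200", "• SMA 50: Tendencia a medio plazo (trimestral).<br>• SMA 200: Tendencia a largo plazo (anual)."),
        ("Cruce Dorado", "Cuando la línea corta (50) cruza hacia ARRIBA a la larga (200). Es una de las señales alcistas más famosas."),
        ("Cruce de la Muerte", "Cuando la línea corta (50) cruza hacia ABAJO a la larga (200). Señal de peligro a largo plazo."),
        ("Soporte y Resistencia", "Muchas veces, el precio rebota exactamente en la línea de 200 días. Los inversores institucionales vigilan esto."),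
        ("Análisis Actual", ("Valores: <strong>" ++ value ++ "</strong>.<br>Relación entre medias: <strong>" ++ prediction ++ "</strong>.")),
        ("Retraso (Lag)", "Al basarse en el pasado, las SMA reaccionan lento. No sirven para predecir picos rápidos.")])]
  let defaultMiddles : List (String × String) := [("Concepto Básico", ("El indicador " ++ method_name ++ " es una herramienta matemática utilizada para predecir movimientos futuros basándose en patrones pasados.")),
        ("¿Qué mide?", (desc)),
        ("La Lógica", "Los mercados no son totalmente aleatorios. Tienen memoria ypsicología. Este indicador intenta cuantificar esa psicología en un número."),
        ("Interpretación", "Generalmente buscamos extremos. Si el valor es muy alto o muy bajo, sugiere que el mercado ha ido demasiado lejos y debe corregir."),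
        ("Tendencia vs Oscilación", ("Algunos indicadores siguen la tendencia (trend-following) y otros oscilan en rangos. Este indicador particular nos da pistas sobre: " ++ desc)),
        ("Lectura del Valor", ("El valor calculado hoy es: <strong>" ++ value ++ "</strong>.")),
        ("La Señal Generada", ("Basado en las reglas estándar, la señal es: <strong>" ++ prediction ++ "</strong>.")),
        ("¿Es infalible?", "Ningún indicador acierta el 100% de las veces. Siempre debe usarse en combinación con otros para confirmar.")]
  let middles := table.getD indicator_id defaultMiddles
  let titleSlide := pvSlideB ("Introducción a: " ++ method_name) ("Bienvenido a esta guía paso a paso sobre el indicador " ++ method_name ++ ".<br>Aprenderemos qué es, cómo funciona y qué nos dice sobre el precio actual.")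
  let historySlide := pvSlideB "Origen Histórico" history
  [titleSlide] ++ middles.map (fun p => pvSlideB p.1 p.2) ++ [historySlide]


-- ===== PRECONDITION & SPEC =====
def Spec_get_slides (indicator_id : String) (method_name : String) (value : String) (prediction : String) (desc : String) (history : String) (out : List (List (String × String))) : Prop := out = get_slides_alt indicator_id method_name value prediction desc history
instance (indicator_id : String) (method_name : String) (value : String) (prediction : String) (desc : String) (history : String) (out : List (List (String × String))) : Decidable (Spec_get_slides indicator_id method_name value prediction desc history out) := by unfold Spec_get_slides; infer_instance

-- ===== CLAIM (what is proved, stated in full; the proofs are below) =====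
def Claim_equal_get_slides : Prop := ∀ (indicator_id : String) (method_name : String) (value : String) (prediction : String) (desc : String) (history : String), Dom_get_slides indicator_id method_name value prediction desc history → Spec_get_slides indicator_id method_name value prediction desc history (get_slides indicator_id method_name value prediction desc history)

-- ===== LEMMAS AND PROOFS =====

-- On an 11-slide list A's padding loop does nothing and the [:10] slice is `take 10`.
lemma pvPad_slice_eleven (L : List (List (String × String))) (h : L.length = 11) :
    PySem.List.slice (pvPad L) none (some 10) = L.take 10 := by
  rw [pvPad, dif_neg (by omega)]
  have h10 : ((10 : Nat) : Int) = (10 : Int) := by norm_num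
  rw [← h10, PySem.List.slice_to_natCast]

-- ===== VERDICT (by name: the statement is the Claim_ definition above) =====
theorem get_slides_spec : Claim_equal_get_slides := by
  intro indicator_id method_name value prediction desc history _
  unfold Spec_get_slides get_slides get_slides_alt
  by_cases h1 : indicator_id = "rsi"
  · subst h1
    rw [pvPad_slice_eleven _ (by rfl)]
    rfl
  · by_cases h2 : indicator_id = "macd"
    · subst h2
      rw [pvPad_slice_eleven _ (by rfl)]
      rfl
    · by_cases h3 : indicator_id = "bb"
      · subst h3
        rw [pvPad_slice_eleven _ (by rfl)]
        rfl
      · by_cases h4 : indicator_id = "sma"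
        · subst h4
          rw [pvPad_slice_eleven _ (by rfl)]
          rfl
        · simp only [beq_iff_eq, h1, h2, h3, h4, if_false]
          rw [pvPad_slice_eleven _ (by rfl)]
          simp only [PySem.Dict.getD_eq_get?_getD, PySem.Dict.ofList, PySem.Dict.update,
            List.foldl_cons, List.foldl_nil, PySem.Dict.get?_insert, PySem.Dict.get?_empty,
            h1, h2, h3, h4, if_false, Option.getD_none]
          rfl
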